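-- pv_equiv track=rewrite | github.com/ug-kim/algorithms | brute_force_search/1_practice_test.py | solution
-- ===== SOURCE A (Python) =====
-- def solution(answers):
--     answer = []
--     supo_1 = [1, 2, 3, 4, 5]
--     supo_2 = [2, 1, 2, 3, 2, 4, 2, 5]
--     supo_3 = [3, 3, 1, 1, 2, 2, 4, 4, 5, 5]
--
--     supo_count = [0 for _ in range(3)]
--
--     for i in range(len(answers)):
--         if answers[i] == supo_1[i % 5]:
--             supo_count[0] += 1
--         if answers[i] == supo_2[i % 8]:
--             supo_count[1] += 1
--         if answers[i] == supo_3[i % 10]: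
--             supo_count[2] += 1
--
--     max_count = max(supo_count)
--     for i in range(3):
--         if supo_count[i] == max_count:
--             answer.append(i + 1)
--
--     return answer
-- ===== SOURCE B (Python) =====
-- def count_matches(answers, pat):
--     c = 0
--     rest = []
--     for a in answers:
--         if not rest:
--             rest = pat
--         if a == rest[0]:
--             c += 1
--         rest = rest[1:]
--     return c
--
--
-- def solution(answers):
--     patterns = [[1, 2, 3, 4, 5], [2, 1, 2, 3, 2, 4, 2, 5], [3, 3, 1, 1, 2, 2, 4, 4, 5, 5]]
--     counts = [count_matches(answers, p) for p in patterns]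
--     best = max(counts)
--     return [i + 1 for i, c in enumerate(counts) if c == best]
-- ===== Notes on version B (the rewrite author's own statement) =====
-- stated objective: alternative
-- what changed: A makes one combined scan over indices with modular arithmetic into three fixed patterns and three counters; B counts each pattern in its own pass by consuming a self-refilling queue of the pattern (no index or mod arithmetic), then picks the best via enumerate/filter.
import Mathlib
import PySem

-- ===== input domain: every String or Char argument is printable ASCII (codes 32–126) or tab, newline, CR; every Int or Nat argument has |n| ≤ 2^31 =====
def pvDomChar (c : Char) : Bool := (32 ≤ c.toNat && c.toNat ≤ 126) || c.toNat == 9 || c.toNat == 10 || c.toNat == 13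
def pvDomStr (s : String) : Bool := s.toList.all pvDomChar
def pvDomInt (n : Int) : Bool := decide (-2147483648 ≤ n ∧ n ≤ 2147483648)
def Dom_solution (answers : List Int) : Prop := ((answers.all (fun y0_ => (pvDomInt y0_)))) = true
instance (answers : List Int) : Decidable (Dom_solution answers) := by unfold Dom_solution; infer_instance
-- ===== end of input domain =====

-- B replaces A's single combined scan with modular index arithmetic by three independent
-- passes, each consuming a self-refilling queue of the pattern (alternative decomposition).


-- ===== PORT A =====
def solution (answers : List Int) : List Int :=
  let supo1 : List Int := [1, 2, 3, 4, 5]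
  let supo2 : List Int := [2, 1, 2, 3, 2, 4, 2, 5]
  let supo3 : List Int := [3, 3, 1, 1, 2, 2, 4, 4, 5, 5]
  -- the loop over range(len(answers)) carrying the three counters of supo_count
  let sc : Int × Int × Int :=
    (PySem.List.pyRange 0 (answers.length : Int) 1).foldl
      (fun sc i =>
        ((if PySem.List.pyGetD answers i 0 = PySem.List.pyGetD supo1 (PySem.Int.mod i 5) 0 then sc.1 + 1 else sc.1),
         (if PySem.List.pyGetD answers i 0 = PySem.List.pyGetD supo2 (PySem.Int.mod i 8) 0 then sc.2.1 + 1 else sc.2.1),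
         (if PySem.List.pyGetD answers i 0 = PySem.List.pyGetD supo3 (PySem.Int.mod i 10) 0 then sc.2.2 + 1 else sc.2.2)))
      (0, 0, 0)
  let supoCount : List Int := [sc.1, sc.2.1, sc.2.2]
  let maxCount : Int := (PySem.List.max? supoCount (fun x => x)).getD 0
  (PySem.List.pyRange 0 3 1).foldl
    (fun answer i => if PySem.List.pyGetD supoCount i 0 = maxCount then answer ++ [i + 1] else answer) []

-- ===== PORT B =====
-- one pass for one pattern: a queue 'rest' is refilled from the pattern whenever empty
def countMatches (answers : List Int) (pat : List Int) : Int :=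
  (answers.foldl
    (fun (s : Int × List Int) a =>
      let rest := if s.2.isEmpty then pat else s.2
      ((if a = PySem.List.pyGetD rest 0 0 then s.1 + 1 else s.1), PySem.List.slice rest (some 1) none))
    (0, [])).1

def solution_alt (answers : List Int) : List Int :=
  let patterns : List (List Int) := [[1, 2, 3, 4, 5], [2, 1, 2, 3, 2, 4, 2, 5], [3, 3, 1, 1, 2, 2, 4, 4, 5, 5]]
  let counts : List Int := patterns.map (fun p => countMatches answers p)
  let best : Int := (PySem.List.max? counts (fun x => x)).getD 0
  ((PySem.List.enumerate counts 0).filter (fun ic => ic.2 == best)).map (fun ic => ic.1 + 1)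

-- ===== PRECONDITION & SPEC =====
def Spec_solution (answers : List Int) (out : List Int) : Prop := out = solution_alt answers
instance (answers : List Int) (out : List Int) : Decidable (Spec_solution answers out) := by unfold Spec_solution; infer_instance

-- ===== CLAIM (what is proved, stated in full; the proofs are below) =====
def Claim_equal_solution : Prop := ∀ (answers : List Int), Dom_solution answers → Spec_solution answers (solution answers)

-- ===== LEMMAS AND PROOFS =====

-- common characterisation: number of matches of 'ans' against pattern 'p' cycled from offset k
def aux (p : List Int) : List Int → Nat → Int
  | [], _ => 0
  | a :: t, k => (if a = p.getD k 0 then 1 else 0) + aux p t (if k + 1 = p.length then 0 else k + 1)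

theorem lemmaA (p : List Int) (ans : List Int) : ∀ (k : Nat), k < p.length → ∀ (c : Int),
    (List.range ans.length).foldl
      (fun c j => if ans.getD j 0 = p.getD ((k + j) % p.length) 0 then c + 1 else c) c
    = c + aux p ans k := by
  induction ans with
  | nil => intro k hk c; simp [aux]
  | cons a t ih =>
    intro k hk c
    rw [show (a :: t).length = t.length + 1 from rfl, List.range_succ_eq_map]
    rw [List.foldl_cons, List.foldl_map]
    have hstep : (fun (c : Int) (j : Nat) =>
        if (a :: t).getD (j + 1) 0 = p.getD ((k + (j + 1)) % p.length) 0 then c + 1 else c)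
      = (fun (c : Int) (j : Nat) =>
        if t.getD j 0 = p.getD (((if k + 1 = p.length then 0 else k + 1) + j) % p.length) 0 then c + 1 else c) := by
      funext c j
      congr 2
      split
      · next h => rw [show k + (j + 1) = p.length + j by omega, Nat.add_mod_left, Nat.zero_add]
      · next h => ring_nf
    rw [hstep, ih _ (by split <;> omega)]
    simp only [aux, List.getD_cons_zero, Nat.add_zero,
      Nat.mod_eq_of_lt hk]
    split <;> ring

theorem lemmaB (p : List Int) (hp : p ≠ []) (ans : List Int) : ∀ (j : Nat), j ≤ p.length → ∀ (c : Int),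
    (ans.foldl
      (fun (s : Int × List Int) a =>
        let rest := if s.2.isEmpty then p else s.2
        ((if a = PySem.List.pyGetD rest 0 0 then s.1 + 1 else s.1), PySem.List.slice rest (some 1) none))
      (c, p.drop j)).1
    = c + aux p ans (if j = p.length then 0 else j) := by
  induction ans with
  | nil => intro j hj c; simp [aux]
  | cons a t ih =>
    intro j hj c
    have hL : 0 < p.length := List.length_pos_iff.mpr hp
    set j' : Nat := if j = p.length then 0 else j with hj'
    have hj'lt : j' < p.length := by rw [hj']; split <;> omega
    have hrest : (if (p.drop j).isEmpty then p else p.drop j) = p.drop j' := by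
      rw [hj']
      by_cases h : j = p.length
      · simp [h, List.drop_length]
      · have : ¬ (p.drop j).isEmpty := by
          simp [List.isEmpty_iff, List.drop_eq_nil_iff]; omega
        simp [h, this]
    have hhead : PySem.List.pyGetD (p.drop j') 0 0 = p.getD j' 0 := by
      rw [PySem.List.pyGetD_ofNat']
      simp [List.getD_eq_getElem?_getD, List.getElem?_drop]
    have hslice : PySem.List.slice (p.drop j') (some 1) none = p.drop (j' + 1) := by
      rw [PySem.List.slice_from (p.drop j') (a := 1) (by norm_num), List.drop_drop]
      norm_num [Nat.add_comm]
    rw [List.foldl_cons]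
    simp only [hrest, hhead, hslice]
    rw [ih (j' + 1) (by omega)]
    have : aux p (a :: t) j' = (if a = p.getD j' 0 then 1 else 0)
        + aux p t (if j' + 1 = p.length then 0 else j' + 1) := rfl
    rw [this]
    split <;> ring

theorem countMatches_eq (p : List Int) (hp : p ≠ []) (ans : List Int) :
    countMatches ans p = aux p ans 0 := by
  unfold countMatches
  have h0 : ([] : List Int) = p.drop p.length := by simp [List.drop_length]
  rw [h0, lemmaB p hp ans p.length le_rfl 0]
  simp

-- A's counter for one pattern, as a plain range fold, equals aux from offset 0
theorem scA_eq (p : List Int) (hp : 0 < p.length) (L : Int) (hL : L = (p.length : Int))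
    (ans : List Int) :
    (PySem.List.pyRange 0 (ans.length : Int) 1).foldl
      (fun (c : Int) i => if PySem.List.pyGetD ans i 0 = PySem.List.pyGetD p (PySem.Int.mod i L) 0 then c + 1 else c) 0
    = aux p ans 0 := by
  rw [PySem.List.pyRange_zero_natCast, List.foldl_map]
  have hstep : (fun (c : Int) (j : Nat) =>
      if PySem.List.pyGetD ans ((j : Int)) 0 = PySem.List.pyGetD p (PySem.Int.mod ((j : Int)) L) 0 then c + 1 else c)
    = (fun (c : Int) (j : Nat) =>
      if ans.getD j 0 = p.getD ((0 + j) % p.length) 0 then c + 1 else c) := by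
    funext c j
    have h1 : PySem.List.pyGetD ans ((j : Int)) 0 = ans.getD j 0 := by
      exact_mod_cast PySem.List.pyGetD_natCast ans j 0
    have h2 : PySem.Int.mod ((j : Int)) L = ((j % p.length : Nat) : Int) := by
      rw [hL]; exact_mod_cast PySem.Int.mod_natCast j p.length
    have h3 : PySem.List.pyGetD p ((j % p.length : Nat) : Int) 0 = p.getD (j % p.length) 0 := by
      exact_mod_cast PySem.List.pyGetD_natCast p (j % p.length) 0
    rw [h1, h2, h3, Nat.zero_add]
  rw [hstep, lemmaA p ans 0 hp 0, zero_add]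

-- the final selection agrees for any three counters
theorem final_eq (x y z : Int) :
    (PySem.List.pyRange 0 3 1).foldl
      (fun (answer : List Int) i =>
        if PySem.List.pyGetD [x, y, z] i 0 = (PySem.List.max? [x, y, z] (fun v => v)).getD 0
        then answer ++ [i + 1] else answer) []
    = ((PySem.List.enumerate [x, y, z] 0).filter
        (fun ic => ic.2 == (PySem.List.max? [x, y, z] (fun v => v)).getD 0)).map
        (fun ic => ic.1 + 1) := by
  have hr : PySem.List.pyRange 0 3 1 = [0, 1, 2] := by decide
  rw [hr]
  set m : Int := (PySem.List.max? [x, y, z] (fun v => v)).getD 0 with hm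
  clear hm
  simp only [List.foldl_cons, List.foldl_nil, PySem.List.enumerate_cons,
    PySem.List.enumerate_nil, PySem.List.pyGetD_ofNat', List.getD_cons_zero,
    List.getD_cons_succ, List.filter_cons, List.filter_nil, beq_iff_eq]
  split_ifs <;> norm_num

-- ===== VERDICT (by name: the statement is the Claim_ definition above) =====
theorem solution_spec : Claim_equal_solution := by
  intro answers _
  unfold Spec_solution solution solution_alt
  simp only
  rw [PySem.List.foldl_prod_mk
    (f := fun (c : Int) i => if PySem.List.pyGetD answers i 0 = PySem.List.pyGetD [1, 2, 3, 4, 5] (PySem.Int.mod i 5) 0 then c + 1 else c)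
    (g := fun (s : Int × Int) i =>
      ((if PySem.List.pyGetD answers i 0 = PySem.List.pyGetD [2, 1, 2, 3, 2, 4, 2, 5] (PySem.Int.mod i 8) 0 then s.1 + 1 else s.1),
       (if PySem.List.pyGetD answers i 0 = PySem.List.pyGetD [3, 3, 1, 1, 2, 2, 4, 4, 5, 5] (PySem.Int.mod i 10) 0 then s.2 + 1 else s.2)))]
  rw [PySem.List.foldl_prod_mk
    (f := fun (c : Int) i => if PySem.List.pyGetD answers i 0 = PySem.List.pyGetD [2, 1, 2, 3, 2, 4, 2, 5] (PySem.Int.mod i 8) 0 then c + 1 else c)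
    (g := fun (c : Int) i => if PySem.List.pyGetD answers i 0 = PySem.List.pyGetD [3, 3, 1, 1, 2, 2, 4, 4, 5, 5] (PySem.Int.mod i 10) 0 then c + 1 else c)]
  simp only [scA_eq [1, 2, 3, 4, 5] (by decide) 5 (by decide) answers,
    scA_eq [2, 1, 2, 3, 2, 4, 2, 5] (by decide) 8 (by decide) answers,
    scA_eq [3, 3, 1, 1, 2, 2, 4, 4, 5, 5] (by decide) 10 (by decide) answers,
    List.map_cons, List.map_nil,
    countMatches_eq [1, 2, 3, 4, 5] (by decide) answers,
    countMatches_eq [2, 1, 2, 3, 2, 4, 2, 5] (by decide) answers,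
    countMatches_eq [3, 3, 1, 1, 2, 2, 4, 4, 5, 5] (by decide) answers]
  exact final_eq _ _ _
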